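-- pv_equiv track=rewrite | github.com/ralampay/omnidex | omnidex/tools/pdf_reader.py | _prepare_page_lines
-- ===== SOURCE A (Python) =====
-- def _normalize_pdf_line(line: str) -> str:
--     """Normalize whitespace within a PDF-extracted line."""
--     return " ".join(line.replace("\u00a0", " ").split()).strip()
--
-- def _prepare_page_lines(page_text: str) -> list[str]:
--     """Normalize one PDF page into stripped lines with blank separators."""
--     normalized_lines: list[str] = []
--     for raw_line in page_text.splitlines():
--         normalized = _normalize_pdf_line(raw_line)
--         if normalized:
--             normalized_lines.append(normalized)
--             continue
--         if normalized_lines and normalized_lines[-1] != "":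
--             normalized_lines.append("")
--     while normalized_lines and normalized_lines[0] == "":
--         normalized_lines.pop(0)
--     while normalized_lines and normalized_lines[-1] == "":
--         normalized_lines.pop()
--     return normalized_lines
-- ===== SOURCE B (Python) =====
-- def _normalize_pdf_line(line: str) -> str:
--     """Normalize whitespace within a PDF-extracted line."""
--     return " ".join(line.replace("\u00a0", " ").split()).strip()
--
-- def _prepare_page_lines(page_text: str) -> list[str]:
--     """Normalize one PDF page into stripped lines with blank separators.
--
--     Different decomposition: accumulate paragraphs (runs of non-blank
--     normalized lines), then join them with single "" separators, so no
--     collapse-in-place or edge-trimming loops are needed."""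
--     paragraphs: list[list[str]] = []
--     current: list[str] = []
--     for line in page_text.splitlines():
--         n = _normalize_pdf_line(line)
--         if n:
--             current.append(n)
--         elif current:
--             paragraphs.append(current)
--             current = []
--     if current:
--         paragraphs.append(current)
--     out: list[str] = []
--     for i, p in enumerate(paragraphs):
--         if i != 0:
--             out.append("")
--         out.extend(p)
--     return out
-- ===== Notes on version B (the rewrite author's own statement) =====
-- stated objective: alternative
-- what changed: B groups normalized lines into paragraph runs and then joins the paragraphs with single blank separators, instead of A's inline collapse of blank runs followed by two edge-trimming while-loops.
import Mathlib
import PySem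

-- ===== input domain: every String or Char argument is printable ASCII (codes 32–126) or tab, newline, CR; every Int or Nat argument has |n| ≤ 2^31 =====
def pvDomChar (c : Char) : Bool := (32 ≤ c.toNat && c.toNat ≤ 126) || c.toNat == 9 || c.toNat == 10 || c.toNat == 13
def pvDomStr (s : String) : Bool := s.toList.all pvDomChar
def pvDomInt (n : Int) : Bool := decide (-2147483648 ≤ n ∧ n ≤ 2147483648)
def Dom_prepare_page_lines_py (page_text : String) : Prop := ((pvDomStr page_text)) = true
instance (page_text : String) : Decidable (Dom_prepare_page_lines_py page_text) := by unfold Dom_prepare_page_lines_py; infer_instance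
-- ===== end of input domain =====

-- B builds paragraph runs and joins them with single "" separators instead of
-- A's inline blank-collapse plus two edge-trimming while-loops (alternative decomposition).

-- ===== PORT A =====

-- _normalize_pdf_line, shared helper of both Pythons
def pvNorm (line : String) : String :=
  PySem.Str.strip (PySem.Str.join " " (PySem.Str.split₀ (PySem.Str.replace line "\u00A0" " ")))

-- while normalized_lines and normalized_lines[0] == "": pop(0)
def pvATrimLead : List String → List String
  | [] => []
  | x :: rest => if x = "" then pvATrimLead rest else x :: rest

-- while normalized_lines and normalized_lines[-1] == "": pop()
def pvATrimTrail (l : List String) : List String :=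
  if l.getLast? = some "" then pvATrimTrail l.dropLast else l
termination_by l.length
decreasing_by
  cases l with
  | nil => simp_all
  | cons a as => simp [List.length_dropLast]

def prepare_page_lines_py (page_text : String) : List String :=
  let normalized_lines :=
    (PySem.Str.splitlines page_text).foldl (fun acc raw_line =>
      let normalized := pvNorm raw_line
      if normalized ≠ "" then acc ++ [normalized]
      else if acc ≠ [] ∧ acc.getLast? ≠ some "" then acc ++ [""]
      else acc) []
  pvATrimTrail (pvATrimLead normalized_lines)

-- ===== PORT B =====

def prepare_page_lines_py_alt (page_text : String) : List String :=
  let st :=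
    (PySem.Str.splitlines page_text).foldl (fun (st : List (List String) × List String) line =>
      let n := pvNorm line
      if n ≠ "" then (st.1, st.2 ++ [n])
      else if st.2 ≠ [] then (st.1 ++ [st.2], ([] : List String))
      else st) ([], [])
  let paragraphs := if st.2 ≠ [] then st.1 ++ [st.2] else st.1
  (PySem.List.enumerate paragraphs).foldl
    (fun out ip => (if ip.1 ≠ 0 then out ++ [""] else out) ++ ip.2) []

-- ===== PRECONDITION & SPEC =====
def Spec_prepare_page_lines_py (page_text : String) (out : List String) : Prop := out = prepare_page_lines_py_alt page_text
instance (page_text : String) (out : List String) : Decidable (Spec_prepare_page_lines_py page_text out) := by unfold Spec_prepare_page_lines_py; infer_instance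

-- ===== CLAIM (what is proved, stated in full; the proofs are below) =====
def Claim_equal_prepare_page_lines_py : Prop := ∀ (page_text : String), Dom_prepare_page_lines_py page_text → Spec_prepare_page_lines_py page_text (prepare_page_lines_py page_text)

-- ===== LEMMAS AND PROOFS =====

-- join paragraphs with single "" separators (B's final value, in closed form)
def pvJ : List (List String) → List String
  | [] => []
  | p :: ps => p ++ ps.flatMap (fun q => "" :: q)

-- A's accumulator as a function of B's state
def pvI (st : List (List String) × List String) : List String :=
  if st.2 = [] then (if st.1 = [] then [] else pvJ st.1 ++ [""])
  else (if st.1 = [] then [] else pvJ st.1 ++ [""]) ++ st.2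

-- well-formedness of B's state: nonempty paragraphs of nonempty strings
def pvWf (st : List (List String) × List String) : Prop :=
  (∀ p ∈ st.1, p ≠ [] ∧ ∀ s ∈ p, s ≠ "") ∧ (∀ s ∈ st.2, s ≠ "")

theorem pvJ_append_singleton (ps : List (List String)) (c : List String) :
    pvJ (ps ++ [c]) = (if ps = [] then [] else pvJ ps ++ [""]) ++ c := by
  cases ps with
  | nil => simp [pvJ]
  | cons p ps => simp [pvJ, List.flatMap_append]

theorem pvJ_ne_nil (ps : List (List String)) (h : ps ≠ [])
    (hwf : ∀ p ∈ ps, p ≠ [] ∧ ∀ s ∈ p, s ≠ "") : pvJ ps ≠ [] := by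
  cases ps with
  | nil => exact absurd rfl h
  | cons p ps =>
    have hp := hwf p (List.mem_cons_self ..)
    intro hcon
    exact hp.1 (List.append_eq_nil_iff.mp hcon).1

theorem pvJ_getLast? (ps : List (List String)) (h : ps ≠ [])
    (hwf : ∀ p ∈ ps, p ≠ [] ∧ ∀ s ∈ p, s ≠ "") : (pvJ ps).getLast? ≠ some "" := by
  induction ps using List.reverseRecOn with
  | nil => exact absurd rfl h
  | append_singleton ps c ih =>
    have hc := hwf c (by simp)
    rw [pvJ_append_singleton]
    rw [List.getLast?_append_of_ne_nil _ hc.1]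
    intro hcon
    exact hc.2 _ (List.mem_of_getLast? hcon) rfl

theorem pvJ_head? (ps : List (List String))
    (hwf : ∀ p ∈ ps, p ≠ [] ∧ ∀ s ∈ p, s ≠ "") : (pvJ ps).head? ≠ some "" := by
  cases ps with
  | nil => simp [pvJ]
  | cons p ps =>
    have hp := hwf p (List.mem_cons_self ..)
    cases p with
    | nil => exact absurd rfl hp.1
    | cons s t =>
      simp [pvJ]
      exact hp.2 s (by simp)

-- the two loop bodies
def pvStepA (acc : List String) (raw : String) : List String :=
  let n := pvNorm raw
  if n ≠ "" then acc ++ [n]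
  else if acc ≠ [] ∧ acc.getLast? ≠ some "" then acc ++ [""]
  else acc

def pvStepB (st : List (List String) × List String) (line : String) :
    List (List String) × List String :=
  let n := pvNorm line
  if n ≠ "" then (st.1, st.2 ++ [n])
  else if st.2 ≠ [] then (st.1 ++ [st.2], ([] : List String))
  else st

theorem pvI_getLast? (ps : List (List String)) (cur : List String) (hc : cur ≠ []) :
    (pvI (ps, cur)).getLast? = cur.getLast? := by
  by_cases hp : ps = []
  · simp [pvI, hc, hp]
  · rw [show pvI (ps, cur) = (pvJ ps ++ [""]) ++ cur from by simp [pvI, hc, hp],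
      List.getLast?_append_of_ne_nil _ hc]

theorem pvStep_inv (st : List (List String) × List String) (raw : String)
    (hwf : pvWf st) : pvStepA (pvI st) raw = pvI (pvStepB st raw) ∧ pvWf (pvStepB st raw) := by
  obtain ⟨ps, cur⟩ := st
  obtain ⟨hps, hcur⟩ := hwf
  simp only [pvWf] at hps hcur ⊢
  by_cases hn : pvNorm raw = ""
  · by_cases hc : cur = []
    · subst hc
      have hB : pvStepB (ps, []) raw = (ps, []) := by simp [pvStepB, hn]
      have hcond : ¬(¬pvI (ps, []) = [] ∧ ¬(pvI (ps, [])).getLast? = some "") := by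
        rintro ⟨h1, h2⟩
        by_cases hp : ps = []
        · exact h1 (by simp [pvI, hp])
        · have hlast : (pvJ ps ++ [""]).getLast? = some "" := by
            rw [List.getLast?_append_of_ne_nil _ (by simp)]; rfl
          exact h2 (by simp [pvI, hp, hlast])
      have hA : pvStepA (pvI (ps, [])) raw = pvI (ps, []) := by
        simp only [pvStepA, hn, ne_eq, not_true_eq_false, if_false, if_neg hcond]
      exact ⟨by rw [hA, hB], by rw [hB]; exact ⟨hps, hcur⟩⟩
    · have hclast : cur.getLast? ≠ some "" := fun hcon => hcur _ (List.mem_of_getLast? hcon) rfl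
      have hIne : pvI (ps, cur) ≠ [] := by
        simp only [pvI, if_neg hc]
        by_cases hp : ps = [] <;> simp [hp, hc]
      have hB : pvStepB (ps, cur) raw = (ps ++ [cur], []) := by simp [pvStepB, hn, hc]
      have hcond : ¬pvI (ps, cur) = [] ∧ ¬(pvI (ps, cur)).getLast? = some "" :=
        ⟨hIne, by rw [pvI_getLast? ps cur hc]; exact hclast⟩
      have hA : pvStepA (pvI (ps, cur)) raw = pvI (ps, cur) ++ [""] := by
        simp only [pvStepA, hn, ne_eq, not_true_eq_false, if_false, if_pos hcond]
      have hI2 : pvI (ps ++ [cur], []) = pvI (ps, cur) ++ [""] := by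
        rw [show pvI (ps ++ [cur], []) = pvJ (ps ++ [cur]) ++ [""] from by simp [pvI],
          pvJ_append_singleton,
          show pvI (ps, cur) = (if ps = [] then [] else pvJ ps ++ [""]) ++ cur from by
            simp [pvI, hc]]
      refine ⟨by rw [hA, hB, hI2], ?_⟩
      rw [hB]
      refine ⟨?_, by simp⟩
      intro p hp
      rcases List.mem_append.mp hp with h | h
      · exact hps p h
      · simp at h; subst h; exact ⟨hc, hcur⟩
  · have hB : pvStepB (ps, cur) raw = (ps, cur ++ [pvNorm raw]) := by simp [pvStepB, hn]
    have hA : pvStepA (pvI (ps, cur)) raw = pvI (ps, cur) ++ [pvNorm raw] := by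
      simp [pvStepA, hn]
    have hI2 : pvI (ps, cur ++ [pvNorm raw]) = pvI (ps, cur) ++ [pvNorm raw] := by
      by_cases hc : cur = [] <;> by_cases hp : ps = [] <;> simp [pvI, hc, hp]
    refine ⟨by rw [hA, hB, hI2], ?_⟩
    rw [hB]
    refine ⟨hps, ?_⟩
    intro s hs
    rcases List.mem_append.mp hs with h | h
    · exact hcur s h
    · simp at h; subst h; exact hn

theorem pvFold_inv (ls : List String) (st : List (List String) × List String)
    (hwf : pvWf st) :
    ls.foldl pvStepA (pvI st) = pvI (ls.foldl pvStepB st) ∧ pvWf (ls.foldl pvStepB st) := by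
  induction ls generalizing st with
  | nil => exact ⟨rfl, hwf⟩
  | cons l ls ih =>
    obtain ⟨h1, h2⟩ := pvStep_inv st l hwf
    simpa [List.foldl_cons, h1] using ih (pvStepB st l) h2

theorem pvTrimLead_of_head (l : List String) (h : l.head? ≠ some "") : pvATrimLead l = l := by
  cases l with
  | nil => rfl
  | cons x rest =>
    simp at h
    simp [pvATrimLead, h]

theorem pvTrimTrail_of_last (l : List String) (h : l.getLast? ≠ some "") : pvATrimTrail l = l := by
  rw [pvATrimTrail, if_neg h]

-- B's output loop computes pvJ
theorem pvOutLoop (ps : List (List String)) (out : List String) (k : Int) (hk : 1 ≤ k) :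
    (PySem.List.enumerate ps k).foldl
      (fun out ip => (if ip.1 ≠ 0 then out ++ [""] else out) ++ ip.2) out
      = out ++ ps.flatMap (fun q => "" :: q) := by
  induction ps generalizing out k with
  | nil => simp [PySem.List.enumerate_nil]
  | cons p ps ih =>
    rw [PySem.List.enumerate_cons, List.foldl_cons]
    simp only [ne_eq, if_pos (by omega : ¬ k = 0)]
    rw [ih (out ++ [""] ++ p) (k + 1) (by omega)]
    simp

theorem pvOutLoop_top (ps : List (List String)) :
    (PySem.List.enumerate ps 0).foldl
      (fun out ip => (if ip.1 ≠ 0 then out ++ [""] else out) ++ ip.2) []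
      = pvJ ps := by
  cases ps with
  | nil => simp [PySem.List.enumerate_nil, pvJ]
  | cons p ps =>
    rw [PySem.List.enumerate_cons, List.foldl_cons]
    have h0 : ((if (0 : Int) ≠ 0 then ([] : List String) ++ [""] else []) ++ p) = p := by simp
    rw [h0, show ((0 : Int) + 1) = 1 from rfl, pvOutLoop ps p 1 le_rfl]
    rfl

theorem pvI_head? (ps : List (List String)) (cur : List String) (hwf : pvWf (ps, cur)) :
    (pvI (ps, cur)).head? ≠ some "" := by
  obtain ⟨hps, hcur⟩ := hwf
  by_cases hp : ps = []
  · subst hp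
    by_cases hc : cur = []
    · subst hc; simp [pvI]
    · rw [show pvI ([], cur) = cur from by simp [pvI, hc]]
      intro hcon
      exact hcur _ (List.mem_of_mem_head? hcon) rfl
  · have hJ : pvJ ps ≠ [] := pvJ_ne_nil ps hp hps
    by_cases hc : cur = []
    · rw [show pvI (ps, cur) = pvJ ps ++ [""] from by simp [pvI, hc, hp],
        List.head?_append_of_ne_nil _ hJ]
      exact pvJ_head? ps hps
    · rw [show pvI (ps, cur) = (pvJ ps ++ [""]) ++ cur from by simp [pvI, hc, hp],
        List.head?_append_of_ne_nil _ (by simp [hJ]), List.head?_append_of_ne_nil _ hJ]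
      exact pvJ_head? ps hps

theorem pvTrim_pvI (ps : List (List String)) (cur : List String) (hwf : pvWf (ps, cur)) :
    pvATrimTrail (pvATrimLead (pvI (ps, cur))) = pvJ (if cur ≠ [] then ps ++ [cur] else ps) := by
  obtain ⟨hps, hcur⟩ := hwf
  rw [pvTrimLead_of_head _ (pvI_head? ps cur ⟨hps, hcur⟩)]
  by_cases hc : cur = []
  · subst hc
    simp only [ne_eq, not_true_eq_false, if_false]
    by_cases hp : ps = []
    · subst hp
      rw [show pvI (([] : List (List String)), ([] : List String)) = [] from rfl]
      rw [pvTrimTrail_of_last _ (by simp)]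
      rfl
    · rw [show pvI (ps, ([] : List String)) = pvJ ps ++ [""] from by simp [pvI, hp]]
      rw [pvATrimTrail, if_pos (by rw [List.getLast?_append_of_ne_nil _ (by simp)]; rfl),
        List.dropLast_concat, pvTrimTrail_of_last _ (pvJ_getLast? ps hp hps)]
  · have hclast : cur.getLast? ≠ some "" := fun hcon => hcur _ (List.mem_of_getLast? hcon) rfl
    rw [pvTrimTrail_of_last _ (by rw [pvI_getLast? ps cur hc]; exact hclast)]
    rw [if_pos hc, pvJ_append_singleton]
    simp [pvI, hc]

-- ===== VERDICT (by name: the statement is the Claim_ definition above) =====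
theorem prepare_page_lines_py_spec : Claim_equal_prepare_page_lines_py := by
  intro page_text _
  unfold Spec_prepare_page_lines_py
  rw [show prepare_page_lines_py page_text =
        pvATrimTrail (pvATrimLead ((PySem.Str.splitlines page_text).foldl pvStepA [])) from rfl]
  rw [show prepare_page_lines_py_alt page_text =
        (PySem.List.enumerate
          (if ((PySem.Str.splitlines page_text).foldl pvStepB ([], [])).2 ≠ [] then
            ((PySem.Str.splitlines page_text).foldl pvStepB ([], [])).1 ++
              [((PySem.Str.splitlines page_text).foldl pvStepB ([], [])).2]
          else ((PySem.Str.splitlines page_text).foldl pvStepB ([], [])).1) 0).foldl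
          (fun out ip => (if ip.1 ≠ 0 then out ++ [""] else out) ++ ip.2) [] from rfl]
  rw [pvOutLoop_top]
  obtain ⟨h1, h2⟩ := pvFold_inv (PySem.Str.splitlines page_text) ([], [])
    (by constructor <;> simp)
  have h1' : (PySem.Str.splitlines page_text).foldl pvStepA [] =
      pvI ((PySem.Str.splitlines page_text).foldl pvStepB ([], [])) := by
    simpa [pvI] using h1
  rw [h1']
  clear h1
  generalize (PySem.Str.splitlines page_text).foldl pvStepB ([], []) = st at h2 ⊢
  obtain ⟨ps, cur⟩ := st
  exact pvTrim_pvI ps cur h2
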